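-- pv_equiv track=rewrite | github.com/alxwen711/contestSubmissionArchive | codeforces/live contests/2023-1/e145/d.py | solve
-- ===== SOURCE A (Python) =====
-- def solve(s):
--     a = s.count("0")
--     b = s.count("1")
--     best = min(a,b)*1000000000001
--     l0,l1 = 0,0
--     r0,r1 = a,b
--     for i in range(len(s)-1):
--         if s[i] == "0":
--             l0 += 1
--             r0 -= 1
--         else:
--             l1 += 1
--             r1 -= 1
--         score = (l1+r0)*1000000000001
--         if s[i] == "1" and s[i+1] == "0":
--             score -= 2000000000002
--             score += 1000000000000
--         if score < best: best = score
--     return best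
-- ===== SOURCE B (Python) =====
-- def solve(s):
--     # Divide and conquer: recursively split the string in half; each segment reports
--     # (zeros, non-zeros, ones, best internal split score or None) and segments are merged.
--     K = 1000000000001
--
--     def seg(lo, hi):  # s[lo:hi], hi - lo >= 1
--         if hi - lo == 1:
--             c = s[lo]
--             return (1 if c == '0' else 0,
--                     0 if c == '0' else 1,
--                     1 if c == '1' else 0,
--                     None)
--         mid = (lo + hi) // 2
--         zL, nzL, oL, bL = seg(lo, mid)
--         zR, nzR, oR, bR = seg(mid, hi)
--         boundary = (nzL + zR) * K
--         if s[mid - 1] == '1' and s[mid] == '0':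
--             boundary -= K + 1
--         cands = [boundary]
--         if bL is not None:
--             cands.append(bL + zR * K)
--         if bR is not None:
--             cands.append(bR + nzL * K)
--         return (zL + zR, nzL + nzR, oL + oR, min(cands))
--
--     if len(s) == 0:
--         return 0
--     z, nz, ones, b = seg(0, len(s))
--     base = min(z, ones) * K
--     return base if b is None else min(base, b)
-- ===== Notes on version B (the rewrite author's own statement) =====
-- stated objective: alternative
-- what changed: A's single left-to-right fused counter loop is replaced by a divide-and-conquer recursion: the string is split in half, each segment returns (zeros, non-zeros, ones, best internal split score), and segments are merged by shifting each side's best with the other side's counts plus the boundary split.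
import Mathlib
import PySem

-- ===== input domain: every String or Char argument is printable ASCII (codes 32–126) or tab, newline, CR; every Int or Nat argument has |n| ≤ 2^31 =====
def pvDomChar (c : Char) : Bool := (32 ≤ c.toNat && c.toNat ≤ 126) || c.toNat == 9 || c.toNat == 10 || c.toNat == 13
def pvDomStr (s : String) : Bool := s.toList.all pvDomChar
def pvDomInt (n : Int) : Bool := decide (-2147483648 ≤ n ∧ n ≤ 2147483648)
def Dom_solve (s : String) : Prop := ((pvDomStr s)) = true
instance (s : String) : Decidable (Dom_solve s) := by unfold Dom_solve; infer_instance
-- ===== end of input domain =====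

-- B replaces A's single left-to-right fused-counter loop by a divide-and-conquer recursion:
-- each half reports (zeros, non-zeros, ones, best internal split score) and halves are merged
-- (objective: alternative; same answer, different algorithm shape).

-- ===== PORT A =====
-- one iteration of A's fused loop: update the four counters for s[i], score, keep the min
def solveStepA (cs : List Char) (st : Int × Int × Int × Int × Int) (i : Int) :
    Int × Int × Int × Int × Int :=
  match st with
  | (l0, l1, r0, r1, best) =>
    let t :=
      if PySem.List.pyGetD cs i ' ' = '0' then (l0 + 1, l1, r0 - 1, r1)
      else (l0, l1 + 1, r0, r1 - 1)
    match t with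
    | (l0, l1, r0, r1) =>
      let score := (l1 + r0) * 1000000000001
      let score :=
        if PySem.List.pyGetD cs i ' ' = '1' ∧ PySem.List.pyGetD cs (i + 1) ' ' = '0'
        then score - 2000000000002 + 1000000000000 else score
      (l0, l1, r0, r1, if score < best then score else best)

def solve (s : String) : Int :=
  let cs := s.toList
  let a : Int := (PySem.Str.count s "0" : Int)
  let b : Int := (PySem.Str.count s "1" : Int)
  let best : Int := min a b * 1000000000001
  -- for i in range(len(s)-1): …   (indices are always in range, so pyGetD's default is never read)
  ((PySem.List.pyRange 0 ((cs.length : Int) - 1)).foldl (solveStepA cs)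
    (0, 0, a, b, best)).2.2.2.2

-- ===== PORT B =====
-- seg(lo, hi) of Source B: zeros, non-zeros, ones and best internal split score of s[lo:hi]
def segB (cs : List Char) (lo hi : Nat) : Int × Int × Int × Option Int :=
  if hi ≤ lo + 1 then
    let c := PySem.List.pyGetD cs (lo : Int) ' '
    ((if c = '0' then 1 else 0), (if c = '0' then 0 else 1), (if c = '1' then 1 else 0), none)
  else
    let mid := (lo + hi) / 2
    match segB cs lo mid, segB cs mid hi with
    | (zL, nzL, oL, bL), (zR, nzR, oR, bR) =>
      let boundary := (nzL + zR) * 1000000000001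
      let boundary :=
        if PySem.List.pyGetD cs ((mid : Int) - 1) ' ' = '1' ∧
           PySem.List.pyGetD cs (mid : Int) ' ' = '0'
        then boundary - (1000000000001 + 1) else boundary
      let cands := (bL.toList.map (fun b => b + zR * 1000000000001)) ++
                   (bR.toList.map (fun b => b + nzL * 1000000000001))
      (zL + zR, nzL + nzR, oL + oR, some (cands.foldl min boundary))
  termination_by hi - lo
  decreasing_by all_goals omega

def solve_alt (s : String) : Int :=
  let cs := s.toList
  if cs.length = 0 then 0
  else
    match segB cs 0 cs.length with
    | (z, _nz, ones, b) =>
      let base := min z ones * 1000000000001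
      match b with
      | none => base
      | some v => min base v

-- ===== PRECONDITION & SPEC =====
def Spec_solve (s : String) (out : Int) : Prop := out = solve_alt s
instance (s : String) (out : Int) : Decidable (Spec_solve s out) := by unfold Spec_solve; infer_instance

-- ===== CLAIM (what is proved, stated in full; the proofs are below) =====
def Claim_equal_solve : Prop := ∀ (s : String), Dom_solve s → Spec_solve s (solve s)

-- ===== LEMMAS AND PROOFS =====

def cnt0 (cs : List Char) : Int := (cs.count '0' : Int)
def cnt1 (cs : List Char) : Int := (cs.count '1' : Int)
def cntNZ (cs : List Char) : Int := (cs.countP (fun c => !(c == '0')) : Int)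

-- the score of the split after index j of t (prefix non-zeros + suffix zeros, K-encoded)
def scoreF (t : List Char) (j : Nat) : Int :=
  (cntNZ (t.take (j + 1)) + (cnt0 t - cnt0 (t.take (j + 1)))) * 1000000000001
  - (if t.getD j ' ' = '1' ∧ t.getD (j + 1) ' ' = '0' then 1000000000002 else 0)

def scoresL (t : List Char) : List Int := (List.range (t.length - 1)).map (scoreF t)

def omin : Option Int → Option Int → Option Int
  | none, y => y
  | x, none => x
  | some a, some b => some (min a b)

def mfold : List Int → Option Int
  | [] => none
  | x :: xs => some (xs.foldl min x)

def subseg (cs : List Char) (lo hi : Nat) : List Char := (cs.drop lo).take (hi - lo)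

theorem cnt0_nil : cnt0 [] = 0 := rfl
theorem cnt1_nil : cnt1 [] = 0 := rfl
theorem cntNZ_nil : cntNZ [] = 0 := rfl

theorem cnt0_append (a b : List Char) : cnt0 (a ++ b) = cnt0 a + cnt0 b := by
  simp [cnt0, List.count_append]
theorem cnt1_append (a b : List Char) : cnt1 (a ++ b) = cnt1 a + cnt1 b := by
  simp [cnt1, List.count_append]
theorem cntNZ_append (a b : List Char) : cntNZ (a ++ b) = cntNZ a + cntNZ b := by
  simp [cntNZ, List.countP_append]

theorem cnt0_cons (c : Char) (cs : List Char) :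
    cnt0 (c :: cs) = (if c = '0' then 1 else 0) + cnt0 cs := by
  by_cases h : c = '0' <;> simp [cnt0, List.count_cons, h] <;> push_cast <;> ring

theorem cnt1_cons (c : Char) (cs : List Char) :
    cnt1 (c :: cs) = (if c = '1' then 1 else 0) + cnt1 cs := by
  by_cases h : c = '1' <;> simp [cnt1, List.count_cons, h] <;> push_cast <;> ring

theorem cntNZ_cons (c : Char) (cs : List Char) :
    cntNZ (c :: cs) = (if c = '0' then 0 else 1) + cntNZ cs := by
  by_cases h : c = '0' <;> simp [cntNZ, List.countP_cons, h] <;> push_cast <;> ring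

-- s.count("c") for a 1-char needle is the character count
theorem count_go_singleton (c : Char) (cs : List Char) (acc fuel : Nat)
    (h : cs.length ≤ fuel) :
    PySem.Chars.count.go [c] fuel cs acc = acc + cs.count c := by
  induction cs generalizing acc fuel with
  | nil => cases fuel <;> simp [PySem.Chars.count.go]
  | cons d t ih =>
    cases fuel with
    | zero => simp at h
    | succ m =>
      simp only [List.length_cons, Nat.succ_le_succ_iff] at h
      simp only [PySem.Chars.count.go, List.isPrefixOf, List.count_cons]
      by_cases hd : c = d
      · subst hd
        simp [ih _ _ h]
        omega
      · have h1 : (c == d) = false := by simp [hd]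
        have h2 : (d == c) = false := by simp [Ne.symm hd]
        simp [h1, h2, ih _ _ h]

theorem chars_count_singleton (cs : List Char) (c : Char) :
    PySem.Chars.count cs [c] = cs.count c := by
  simp [PySem.Chars.count, count_go_singleton c cs 0 cs.length le_rfl]

theorem str_count0 (s : String) : (PySem.Str.count s "0" : Int) = cnt0 s.toList := by
  have : ("0" : String).toList = ['0'] := by decide
  simp [PySem.Str.count, this, chars_count_singleton, cnt0]

theorem str_count1 (s : String) : (PySem.Str.count s "1" : Int) = cnt1 s.toList := by
  have : ("1" : String).toList = ['1'] := by decide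
  simp [PySem.Str.count, this, chars_count_singleton, cnt1]

-- min-fold algebra
theorem foldl_min_pull (xs : List Int) (a x : Int) :
    xs.foldl min (min a x) = min a (xs.foldl min x) := by
  induction xs generalizing x with
  | nil => simp
  | cons y t ih => simp only [List.foldl_cons, min_assoc, ih]

theorem mfold_cons (b : Int) (l : List Int) : mfold (b :: l) = omin (some b) (mfold l) := by
  cases l with
  | nil => rfl
  | cons x t => simp [mfold, omin, foldl_min_pull]

theorem omin_assoc (x y z : Option Int) : omin (omin x y) z = omin x (omin y z) := by
  cases x <;> cases y <;> cases z <;> simp [omin, min_assoc]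

theorem mfold_append (l1 l2 : List Int) : mfold (l1 ++ l2) = omin (mfold l1) (mfold l2) := by
  induction l1 with
  | nil => simp [mfold, omin]
  | cons x t ih => rw [List.cons_append, mfold_cons, ih, mfold_cons, omin_assoc]

theorem mfold_map_add (l : List Int) (c : Int) :
    mfold (l.map (fun b => b + c)) = (mfold l).map (fun b => b + c) := by
  cases l with
  | nil => rfl
  | cons x t =>
    simp only [List.map_cons, mfold, Option.map_some]
    congr 1
    induction t generalizing x with
    | nil => rfl
    | cons y u ih =>
      simp only [List.map_cons, List.foldl_cons]
      rw [← ih (min x y)]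
      congr 1
      omega

theorem foldl_min_eq_mfold (xs : List Int) (b0 : Int) :
    xs.foldl min b0 = match mfold xs with | none => b0 | some v => min b0 v := by
  cases xs with
  | nil => rfl
  | cons x t => simp [mfold, foldl_min_pull]

-- one-step counter bookkeeping: extending the prefix by one character
theorem cnt0_take_succ (cs : List Char) (m : Nat) (h : m < cs.length) :
    cnt0 (cs.take (m + 1)) = cnt0 (cs.take m) + (if cs.getD m ' ' = '0' then 1 else 0) := by
  have h1 : List.take (m + 1) cs = List.take m cs ++ [cs.getD m ' '] := by
    rw [List.take_succ]
    simp [List.getElem?_eq_getElem h, List.getD_eq_getElem cs ' ' h]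
  rw [h1, cnt0_append]
  rw [List.getD_eq_getElem cs ' ' h]
  split_ifs with hc <;> simp [cnt0, hc]

theorem cntNZ_take_succ (cs : List Char) (m : Nat) (h : m < cs.length) :
    cntNZ (cs.take (m + 1)) = cntNZ (cs.take m) + (if cs.getD m ' ' = '0' then 0 else 1) := by
  have h1 : List.take (m + 1) cs = List.take m cs ++ [cs.getD m ' '] := by
    rw [List.take_succ]
    simp [List.getElem?_eq_getElem h, List.getD_eq_getElem cs ' ' h]
  rw [h1, cntNZ_append]
  rw [List.getD_eq_getElem cs ' ' h]
  split_ifs with hc <;> simp [cntNZ, hc]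

theorem if_min_congr (x y F : Int) (h : x = y) :
    (if x < F then x else F) = (if y < F then y else F) := by rw [h]

-- A's fused loop computes the running min of scoreF over the first m splits
theorem loop_invA (cs : List Char) (B0 : Int) (m : Nat) (hm : m + 1 ≤ cs.length) :
    ((List.range m).map (fun k : Nat => (k : Int))).foldl (solveStepA cs)
        (0, 0, cnt0 cs, cnt1 cs, B0) =
      (cnt0 (cs.take m), cntNZ (cs.take m),
       cnt0 cs - cnt0 (cs.take m), cnt1 cs - cntNZ (cs.take m),
       (List.range m).foldl (fun b j => if scoreF cs j < b then scoreF cs j else b) B0) := by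
  induction m with
  | zero => simp [cnt0_nil, cntNZ_nil]
  | succ m ih =>
    have hm' : m + 1 ≤ cs.length := by omega
    have hmlt : m < cs.length := by omega
    rw [show ((List.range (m + 1)).map (fun k : Nat => (k : Int)))
          = (List.range m).map (fun k : Nat => (k : Int)) ++ [(m : Int)] by
        simp [List.range_succ]]
    rw [List.range_succ, List.foldl_append, List.foldl_append, ih hm']
    simp only [List.foldl_cons, List.foldl_nil]
    rw [solveStepA]
    have hget : PySem.List.pyGetD cs (m : Int) ' ' = cs.getD m ' ' :=
      PySem.List.pyGetD_natCast cs m ' '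
    have hget1 : PySem.List.pyGetD cs ((m : Int) + 1) ' ' = cs.getD (m + 1) ' ' := by
      rw [show ((m : Int) + 1) = ((m + 1 : Nat) : Int) by push_cast; ring,
        PySem.List.pyGetD_natCast]
    have hsc : scoreF cs m =
        (cntNZ (cs.take (m + 1)) + (cnt0 cs - cnt0 (cs.take (m + 1)))) * 1000000000001
        - (if cs.getD m ' ' = '1' ∧ cs.getD (m + 1) ' ' = '0' then 1000000000002 else 0) := rfl
    rw [hget, hget1]
    by_cases h0 : cs.getD m ' ' = '0'
    · have hne : ¬ (cs.getD m ' ' = '1' ∧ cs.getD (m + 1) ' ' = '0') := by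
        rintro ⟨hc, _⟩; rw [h0] at hc; exact absurd hc (by decide)
      rw [if_pos h0]
      dsimp only
      rw [if_neg hne, hsc, if_neg hne, cnt0_take_succ cs m hmlt, cntNZ_take_succ cs m hmlt,
        if_pos h0, if_pos h0]
      simp only [Prod.mk.injEq]
      refine ⟨?_, ?_, ?_, ?_, ?_⟩ <;>
        first
        | trivial
        | omega
        | exact if_min_congr _ _ _ (by ring)
    · rw [if_neg h0]
      dsimp only
      rw [hsc, cnt0_take_succ cs m hmlt, cntNZ_take_succ cs m hmlt, if_neg h0, if_neg h0]
      simp only [Prod.mk.injEq]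
      refine ⟨?_, ?_, ?_, ?_, ?_⟩ <;>
        first
        | trivial
        | omega
        | (by_cases hc : cs.getD m ' ' = '1' ∧ cs.getD (m + 1) ' ' = '0'
           · rw [if_pos hc, if_pos hc]
             exact if_min_congr _ _ _ (by ring)
           · rw [if_neg hc, if_neg hc]
             exact if_min_congr _ _ _ (by ring))

-- scores of a concatenation: left scores shifted by right zeros, the boundary, right scores
-- shifted by left non-zeros
theorem scoreF_append_left (L R : List Char) (j : Nat) (hj : j + 1 < L.length) :
    scoreF (L ++ R) j = scoreF L j + cnt0 R * 1000000000001 := by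
  have ht : (L ++ R).take (j + 1) = L.take (j + 1) :=
    List.take_append_of_le_length (by omega)
  have hg : (L ++ R).getD j ' ' = L.getD j ' ' := List.getD_append _ _ _ _ (by omega)
  have hg1 : (L ++ R).getD (j + 1) ' ' = L.getD (j + 1) ' ' :=
    List.getD_append _ _ _ _ (by omega)
  simp only [scoreF, ht, hg, hg1, cnt0_append]
  ring

theorem scoreF_append_right (L R : List Char) (i : Nat) (hL : 0 < L.length)
    (hi : i + 1 < R.length) :
    scoreF (L ++ R) (L.length + i) = scoreF R i + cntNZ L * 1000000000001 := by
  have ht : (L ++ R).take (L.length + i + 1) = L ++ R.take (i + 1) := by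
    rw [show L.length + i + 1 = L.length + (i + 1) by ring, List.take_append]
    congr 1
    · exact List.take_of_length_le (by omega)
    · congr 1
      omega
  have hg : (L ++ R).getD (L.length + i) ' ' = R.getD i ' ' := by
    rw [List.getD_append_right _ _ _ _ (by omega)]
    congr 1
    omega
  have hg1 : (L ++ R).getD (L.length + i + 1) ' ' = R.getD (i + 1) ' ' := by
    rw [List.getD_append_right _ _ _ _ (by omega)]
    congr 1
    omega
  simp only [scoreF, ht, hg, hg1, cnt0_append, cntNZ_append]
  ring

theorem scores_append (L R : List Char) (hL : L ≠ []) (hR : R ≠ []) :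
    scoresL (L ++ R) =
      (scoresL L).map (fun b => b + cnt0 R * 1000000000001) ++
      scoreF (L ++ R) (L.length - 1) ::
      (scoresL R).map (fun b => b + cntNZ L * 1000000000001) := by
  have hLp : 0 < L.length := List.length_pos_iff.mpr hL
  have hRp : 0 < R.length := List.length_pos_iff.mpr hR
  have hlen : (L ++ R).length - 1 = (L.length - 1) + (1 + (R.length - 1)) := by
    simp [List.length_append]; omega
  rw [scoresL, hlen, List.range_add, List.map_append]
  congr 1
  · rw [scoresL, List.map_map]
    apply List.map_congr_left
    intro j hj
    rw [List.mem_range] at hj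
    exact scoreF_append_left L R j (by omega)
  · rw [show 1 + (R.length - 1) = (R.length - 1) + 1 by omega, List.range_succ_eq_map,
      List.map_cons, List.map_cons, List.map_map, List.map_map]
    congr 1
    rw [scoresL, List.map_map]
    apply List.map_congr_left
    intro i hi
    rw [List.mem_range] at hi
    have heq : L.length - 1 + Nat.succ i = L.length + i := by omega
    simp only [Function.comp_apply, heq]
    exact scoreF_append_right L R i hLp (by omega)

theorem subseg_split (cs : List Char) (lo mid hi : Nat) (h1 : lo ≤ mid) (h2 : mid ≤ hi) :
    subseg cs lo hi = subseg cs lo mid ++ subseg cs mid hi := by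
  have hsub : List.drop (mid - lo) (List.drop lo cs) = List.drop mid cs := by
    rw [List.drop_drop]
    congr 1
    omega
  rw [subseg, subseg, subseg, show hi - lo = (mid - lo) + (hi - mid) by omega, List.take_add,
    hsub]

theorem subseg_length (cs : List Char) (lo hi : Nat) (h1 : lo ≤ hi) (h2 : hi ≤ cs.length) :
    (subseg cs lo hi).length = hi - lo := by
  simp [subseg]
  omega

theorem subseg_getD (cs : List Char) (lo hi i : Nat) (h1 : lo + i < hi)
    (h2 : hi ≤ cs.length) :
    (subseg cs lo hi).getD i ' ' = cs.getD (lo + i) ' ' := by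
  have hi' : i < (subseg cs lo hi).length := by rw [subseg_length cs lo hi (by omega) h2]; omega
  have hc : lo + i < cs.length := by omega
  rw [List.getD_eq_getElem _ _ hi', List.getD_eq_getElem _ _ hc]
  simp [subseg]

theorem subseg_single (cs : List Char) (lo : Nat) (h : lo < cs.length) :
    subseg cs lo (lo + 1) = [cs.getD lo ' '] := by
  apply List.ext_getElem
  · rw [subseg_length cs lo (lo + 1) (by omega) (by omega)]
    simp
  · intro i h1 h2
    simp only [List.length_cons, List.length_nil] at h2
    interval_cases i
    have h3 : (subseg cs lo (lo + 1)).getD 0 ' ' = cs.getD (lo + 0) ' ' :=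
      subseg_getD cs lo (lo + 1) 0 (by omega) (by omega)
    rw [List.getD_eq_getElem _ _ h1] at h3
    simp only [List.getElem_cons_zero]
    rw [h3]
    norm_num

theorem mfold_optList (o : Option Int) (f : Int → Int) :
    mfold (o.toList.map f) = o.map f := by
  cases o <;> rfl

theorem omin_left_comm (a b c : Option Int) :
    omin a (omin b c) = omin b (omin a c) := by
  cases a <;> cases b <;> cases c <;> simp [omin, min_left_comm, min_comm]

-- the divide-and-conquer recursion computes the counts and the min split score of its segment
theorem segB_spec (cs : List Char) (lo hi : Nat) (h1 : lo < hi) (h2 : hi ≤ cs.length) :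
    segB cs lo hi =
      (cnt0 (subseg cs lo hi), cntNZ (subseg cs lo hi), cnt1 (subseg cs lo hi),
       mfold (scoresL (subseg cs lo hi))) := by
  fun_induction segB cs lo hi with
  | case1 lo hi hle c =>
    have hlo : hi = lo + 1 := by omega
    subst hlo
    rw [subseg_single cs lo (by omega)]
    have hc : c = cs.getD lo ' ' := PySem.List.pyGetD_natCast cs lo ' '
    rw [hc]
    have : scoresL [cs.getD lo ' '] = [] := by simp [scoresL]
    by_cases h : cs.getD lo ' ' = '0' <;>
      by_cases h1 : cs.getD lo ' ' = '1' <;>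
        simp_all [cnt0_cons, cnt1_cons, cntNZ_cons, cnt0_nil, cnt1_nil, cntNZ_nil, mfold]
  | case2 lo hi hle mid zL nzL oL bL zR nzR oR bR hReq hLeq bnd1 bnd2 cands ihL ihR =>
    have hmlo : lo < mid := by omega
    have hmhi : mid < hi := by omega
    have hL := ihL hmlo (by omega)
    have hR := ihR hmhi h2
    rw [hLeq] at hL
    rw [hReq] at hR
    simp only [Prod.mk.injEq] at hL hR
    obtain ⟨hzL, hnzL, hoL, hbL⟩ := hL
    obtain ⟨hzR, hnzR, hoR, hbR⟩ := hR
    subst hzL hnzL hoL hbL hzR hnzR hoR hbR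
    have hLlen : (subseg cs lo mid).length = mid - lo :=
      subseg_length cs lo mid (by omega) (by omega)
    have hRlen : (subseg cs mid hi).length = hi - mid := subseg_length cs mid hi (by omega) h2
    have hLne : subseg cs lo mid ≠ [] := by
      intro he; rw [he] at hLlen; simp at hLlen; omega
    have hRne : subseg cs mid hi ≠ [] := by
      intro he; rw [he] at hRlen; simp at hRlen; omega
    have hsplit : subseg cs lo hi = subseg cs lo mid ++ subseg cs mid hi :=
      subseg_split cs lo mid hi (by omega) (by omega)
    have hpg1 : PySem.List.pyGetD cs ((mid : Int) - 1) ' ' = cs.getD (mid - 1) ' ' := by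
      rw [show ((mid : Int) - 1) = ((mid - 1 : Nat) : Int) by omega, PySem.List.pyGetD_natCast]
    have hpg2 : PySem.List.pyGetD cs (mid : Int) ' ' = cs.getD mid ' ' :=
      PySem.List.pyGetD_natCast cs mid ' '
    have hg1 : (subseg cs lo hi).getD ((subseg cs lo mid).length - 1) ' '
        = cs.getD (mid - 1) ' ' := by
      rw [hLlen]
      have h := subseg_getD cs lo hi (mid - lo - 1) (by omega) h2
      rw [h]
      congr 1
      omega
    have hg2 : (subseg cs lo hi).getD ((subseg cs lo mid).length - 1 + 1) ' '
        = cs.getD mid ' ' := by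
      rw [hLlen]
      have h := subseg_getD cs lo hi (mid - lo - 1 + 1) (by omega) h2
      rw [show mid - lo - 1 + 1 = mid - lo - 1 + 1 from rfl] at h
      rw [h]
      congr 1
      omega
    have htake : (subseg cs lo hi).take ((subseg cs lo mid).length - 1 + 1)
        = subseg cs lo mid := by
      rw [hsplit, show (subseg cs lo mid).length - 1 + 1 = (subseg cs lo mid).length by omega,
        List.take_left]
    have hhead : scoreF (subseg cs lo hi) ((subseg cs lo mid).length - 1) = bnd2 := by
      have hb : bnd2 = if PySem.List.pyGetD cs ((mid : Int) - 1) ' ' = '1' ∧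
            PySem.List.pyGetD cs (mid : Int) ' ' = '0'
          then (cntNZ (subseg cs lo mid) + cnt0 (subseg cs mid hi)) * 1000000000001
            - (1000000000001 + 1)
          else (cntNZ (subseg cs lo mid) + cnt0 (subseg cs mid hi)) * 1000000000001 := rfl
      rw [hb, hpg1, hpg2, scoreF, htake, hg1, hg2, hsplit, cnt0_append]
      split_ifs <;> ring
    simp only [Prod.mk.injEq]
    refine ⟨?_, ?_, ?_, ?_⟩
    · rw [hsplit, cnt0_append]
    · rw [hsplit, cntNZ_append]
    · rw [hsplit, cnt1_append]
    · have hc : (some (List.foldl min bnd2 cands) : Option Int)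
          = omin (some bnd2)
              (omin ((mfold (scoresL (subseg cs lo mid))).map
                       (fun b => b + cnt0 (subseg cs mid hi) * 1000000000001))
                    ((mfold (scoresL (subseg cs mid hi))).map
                       (fun b => b + cntNZ (subseg cs lo mid) * 1000000000001))) := by
        rw [show (some (List.foldl min bnd2 cands) : Option Int) = mfold (bnd2 :: cands)
              from rfl,
          mfold_cons,
          show cands = ((mfold (scoresL (subseg cs lo mid))).toList.map
              (fun b => b + cnt0 (subseg cs mid hi) * 1000000000001)) ++
            ((mfold (scoresL (subseg cs mid hi))).toList.map
              (fun b => b + cntNZ (subseg cs lo mid) * 1000000000001)) from rfl,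
          mfold_append, mfold_optList, mfold_optList]
      rw [hc, hsplit, scores_append _ _ hLne hRne, mfold_append, mfold_cons,
        mfold_map_add, mfold_map_add, ← hsplit, hhead]
      exact omin_left_comm _ _ _

theorem foldl_if_min (l : List Nat) (f : Nat → Int) (b0 : Int) :
    l.foldl (fun b j => if f j < b then f j else b) b0 =
      match mfold (l.map f) with | none => b0 | some v => min b0 v := by
  have h : l.foldl (fun b j => if f j < b then f j else b) b0 = (l.map f).foldl min b0 := by
    rw [List.foldl_map]
    congr 1
    funext b j
    simp only [min_def]
    split_ifs <;> omega
  rw [h, foldl_min_eq_mfold]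

theorem subseg_full (cs : List Char) : subseg cs 0 cs.length = cs := by
  simp [subseg]

-- ===== VERDICT (by name: the statement is the Claim_ definition above) =====
theorem solve_spec : Claim_equal_solve := by
  intro s _
  unfold Spec_solve solve solve_alt
  dsimp only
  rw [str_count0, str_count1]
  cases hcs : s.toList with
  | nil => simp [PySem.List.pyRange, cnt0_nil, cnt1_nil]
  | cons c t =>
    have hlen : 1 ≤ (c :: t).length := by simp
    have hcast : (((c :: t).length : Int) - 1) = (((c :: t).length - 1 : Nat) : Int) := by
      simp
    rw [hcast, PySem.List.pyRange_zero_natCast,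
      loop_invA (c :: t) (min (cnt0 (c :: t)) (cnt1 (c :: t)) * 1000000000001)
        ((c :: t).length - 1) (by omega)]
    dsimp only
    rw [foldl_if_min (List.range ((c :: t).length - 1)) (scoreF (c :: t))]
    rw [if_neg (by simp), segB_spec (c :: t) 0 (c :: t).length (by omega) le_rfl,
      subseg_full]
    dsimp only
    rw [show (List.range ((c :: t).length - 1)).map (scoreF (c :: t)) = scoresL (c :: t)
          from rfl]
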